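-- pv_equiv track=rewrite | github.com/spyrosmouchlianitis/PRevent | src/utils/diffs.py | get_comment_patterns
-- ===== SOURCE A (Python) =====
-- def get_comment_patterns(lang: str) -> list[str]:
--     """Get list of comment patterns that apply to the given language."""
--     patterns = [
--         {
--             'languages': ['Bash', 'Perl', 'Python', 'R', 'Ruby', 'Rust'],
--             'pattern': r'#.*$',
--         },
--         {
--             'languages': [
--                 'Dart', 'dotnet', 'Go', 'Groovy', 'Java', 'JavaScript',
--                 'Kotlin', 'Objective-C', 'PHP', 'Rust', 'Scala', 'Swift'
--             ],
--             'pattern': r'//.*$',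
--         },
--         {
--             'languages': [
--                 'C', 'C++', 'CSS', 'dotnet', 'Dart', 'Go', 'Groovy',
--                 'Java', 'JavaScript', 'Kotlin', 'Objective-C', 'PHP',
--                 'Rust', 'Scala', 'Swift'
--             ],
--             'pattern': r'/\*[\s\S]*?\*/',
--         },
--         {
--             'languages': ['Clojure'],
--             'pattern': r';.*$',
--         },
--         {
--             'languages': ['HTML', 'dotnet'],
--             'pattern': r'<!--[\s\S]*?-->',
--         },
--         {
--             'languages': ['Lua'],
--             'pattern': r'--[\s\S].*$',
--         },
--         {
--             'languages': ['Python'],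
--             'pattern': r'"""[\s\S]*?"""',
--         },
--         {
--             'languages': ['Python'],
--             'pattern': r"'''[\s\S]*?'''",
--         },
--         {
--             'languages': ['Ruby'],
--             'pattern': r'=begin[\s\S]*?=end',
--         },
--         {
--             'languages': ['SQL'],
--             'pattern': r'--.*',
--         }
--     ]
--
--     return [
--         p['pattern']
--         for p in patterns
--         if lang.lower() in map(str.lower, p['languages'])
--     ]
-- ===== SOURCE B (Python) =====
-- # Inverted index: one hardcoded dict from lowercased language -> ordered pattern list;
-- # the body is a single keyed lookup instead of a scan over the records.
--
-- _COMMENT_PATTERNS = {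
--     'bash': [r'#.*$'],
--     'perl': [r'#.*$'],
--     'python': [r'#.*$', r'"""[\s\S]*?"""', r"'''[\s\S]*?'''"],
--     'r': [r'#.*$'],
--     'ruby': [r'#.*$', r'=begin[\s\S]*?=end'],
--     'rust': [r'#.*$', r'//.*$', r'/\*[\s\S]*?\*/'],
--     'dart': [r'//.*$', r'/\*[\s\S]*?\*/'],
--     'dotnet': [r'//.*$', r'/\*[\s\S]*?\*/', r'<!--[\s\S]*?-->'],
--     'go': [r'//.*$', r'/\*[\s\S]*?\*/'],
--     'groovy': [r'//.*$', r'/\*[\s\S]*?\*/'],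
--     'java': [r'//.*$', r'/\*[\s\S]*?\*/'],
--     'javascript': [r'//.*$', r'/\*[\s\S]*?\*/'],
--     'kotlin': [r'//.*$', r'/\*[\s\S]*?\*/'],
--     'objective-c': [r'//.*$', r'/\*[\s\S]*?\*/'],
--     'php': [r'//.*$', r'/\*[\s\S]*?\*/'],
--     'scala': [r'//.*$', r'/\*[\s\S]*?\*/'],
--     'swift': [r'//.*$', r'/\*[\s\S]*?\*/'],
--     'c': [r'/\*[\s\S]*?\*/'],
--     'c++': [r'/\*[\s\S]*?\*/'],
--     'css': [r'/\*[\s\S]*?\*/'],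
--     'clojure': [r';.*$'],
--     'html': [r'<!--[\s\S]*?-->'],
--     'lua': [r'--[\s\S].*$'],
--     'sql': [r'--.*'],
-- }
--
--
-- def get_comment_patterns(lang: str) -> list[str]:
--     """Get list of comment patterns that apply to the given language."""
--     return list(_COMMENT_PATTERNS.get(lang.lower(), []))
-- ===== Notes on version B (the rewrite author's own statement) =====
-- stated objective: simpler
-- what changed: Replaces the per-call list of language-set records and its membership-filtering comprehension with one module-level inverted dict from lowercased language to its ordered pattern list; the body becomes a single keyed lookup with [] as default.
import Mathlib
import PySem

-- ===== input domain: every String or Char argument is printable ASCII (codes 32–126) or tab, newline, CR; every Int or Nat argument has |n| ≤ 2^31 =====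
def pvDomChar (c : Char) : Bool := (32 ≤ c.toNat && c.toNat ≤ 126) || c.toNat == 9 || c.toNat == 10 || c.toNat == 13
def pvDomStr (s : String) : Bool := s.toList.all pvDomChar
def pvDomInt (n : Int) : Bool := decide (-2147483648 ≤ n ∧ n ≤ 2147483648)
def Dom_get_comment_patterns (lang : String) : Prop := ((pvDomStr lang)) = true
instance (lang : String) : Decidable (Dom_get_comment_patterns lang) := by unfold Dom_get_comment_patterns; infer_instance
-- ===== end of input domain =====

-- B replaces A's per-call record scan + membership filter by one inverted dict keyed on the
-- lowercased language name, looked up once (objective: simpler).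

-- ===== PORT A =====
-- the literal `patterns` table: (languages, pattern) records in source order
def pvRecords : List (List String × String) :=
  [ (["Bash", "Perl", "Python", "R", "Ruby", "Rust"], "#.*$"),
    (["Dart", "dotnet", "Go", "Groovy", "Java", "JavaScript",
      "Kotlin", "Objective-C", "PHP", "Rust", "Scala", "Swift"], "//.*$"),
    (["C", "C++", "CSS", "dotnet", "Dart", "Go", "Groovy",
      "Java", "JavaScript", "Kotlin", "Objective-C", "PHP",
      "Rust", "Scala", "Swift"], "/\\*[\\s\\S]*?\\*/"),
    (["Clojure"], ";.*$"),
    (["HTML", "dotnet"], "<!--[\\s\\S]*?-->"),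
    (["Lua"], "--[\\s\\S].*$"),
    (["Python"], "\"\"\"[\\s\\S]*?\"\"\""),
    (["Python"], "'''[\\s\\S]*?'''"),
    (["Ruby"], "=begin[\\s\\S]*?=end"),
    (["SQL"], "--.*") ]

-- list comprehension: keep p['pattern'] when lang.lower() in map(str.lower, p['languages'])
def get_comment_patterns (lang : String) : List String :=
  (pvRecords.filter (fun p => (p.1.map PySem.Str.lower).contains (PySem.Str.lower lang))).map
    (fun p => p.2)

-- ===== PORT B =====
-- the module-level inverted index _COMMENT_PATTERNS
def pvMapping : PySem.Dict String (List String) :=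
  PySem.Dict.ofList
    [ ("bash", ["#.*$"]),
      ("perl", ["#.*$"]),
      ("python", ["#.*$", "\"\"\"[\\s\\S]*?\"\"\"", "'''[\\s\\S]*?'''"]),
      ("r", ["#.*$"]),
      ("ruby", ["#.*$", "=begin[\\s\\S]*?=end"]),
      ("rust", ["#.*$", "//.*$", "/\\*[\\s\\S]*?\\*/"]),
      ("dart", ["//.*$", "/\\*[\\s\\S]*?\\*/"]),
      ("dotnet", ["//.*$", "/\\*[\\s\\S]*?\\*/", "<!--[\\s\\S]*?-->"]),
      ("go", ["//.*$", "/\\*[\\s\\S]*?\\*/"]),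
      ("groovy", ["//.*$", "/\\*[\\s\\S]*?\\*/"]),
      ("java", ["//.*$", "/\\*[\\s\\S]*?\\*/"]),
      ("javascript", ["//.*$", "/\\*[\\s\\S]*?\\*/"]),
      ("kotlin", ["//.*$", "/\\*[\\s\\S]*?\\*/"]),
      ("objective-c", ["//.*$", "/\\*[\\s\\S]*?\\*/"]),
      ("php", ["//.*$", "/\\*[\\s\\S]*?\\*/"]),
      ("scala", ["//.*$", "/\\*[\\s\\S]*?\\*/"]),
      ("swift", ["//.*$", "/\\*[\\s\\S]*?\\*/"]),
      ("c", ["/\\*[\\s\\S]*?\\*/"]),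
      ("c++", ["/\\*[\\s\\S]*?\\*/"]),
      ("css", ["/\\*[\\s\\S]*?\\*/"]),
      ("clojure", [";.*$"]),
      ("html", ["<!--[\\s\\S]*?-->"]),
      ("lua", ["--[\\s\\S].*$"]),
      ("sql", ["--.*"]) ]

-- _COMMENT_PATTERNS.get(lang.lower(), [])
def get_comment_patterns_alt (lang : String) : List String :=
  pvMapping.getD (PySem.Str.lower lang) []

-- ===== PRECONDITION & SPEC =====
def Spec_get_comment_patterns (lang : String) (out : List String) : Prop := out = get_comment_patterns_alt lang
instance (lang : String) (out : List String) : Decidable (Spec_get_comment_patterns lang out) := by unfold Spec_get_comment_patterns; infer_instance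

-- ===== CLAIM (what is proved, stated in full; the proofs are below) =====
def Claim_equal_get_comment_patterns : Prop := ∀ (lang : String), Dom_get_comment_patterns lang → Spec_get_comment_patterns lang (get_comment_patterns lang)

-- ===== LEMMAS AND PROOFS =====

-- the 24 lowercased language names that occur anywhere in A's table (= B's keys)
def pvKnown : List String :=
  ["bash", "perl", "python", "r", "ruby", "rust", "dart", "dotnet", "go", "groovy",
   "java", "javascript", "kotlin", "objective-c", "php", "scala", "swift",
   "c", "c++", "css", "clojure", "html", "lua", "sql"]

-- lookup in a dict extended with keys all different from s is lookup in the base dict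
theorem pv_getD_update_not_mem (l : List (String × List String))
    (d : PySem.Dict String (List String)) (s : String) (h : ∀ p ∈ l, p.1 ≠ s) :
    (d.update l).getD s [] = d.getD s [] := by
  induction l generalizing d with
  | nil => rfl
  | cons a t ih =>
    have ha : a.1 ≠ s := h a (List.mem_cons_self)
    have ht : ∀ p ∈ t, p.1 ≠ s := fun p hp => h p (List.mem_cons_of_mem _ hp)
    calc (d.update (a :: t)).getD s []
        = ((d.insert a.1 a.2).update t).getD s [] := rfl
      _ = (d.insert a.1 a.2).getD s [] := ih _ ht
      _ = d.getD s [] := by rw [PySem.Dict.getD_insert]; simp [Ne.symm ha]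

-- both sides depend on the input only through its lowercasing; pointwise equality on it
theorem pv_core_eq (s : String) :
    (pvRecords.filter (fun p => (p.1.map PySem.Str.lower).contains s)).map (fun p => p.2)
      = pvMapping.getD s [] := by
  by_cases h : s ∈ pvKnown
  · fin_cases h <;> rfl
  · simp only [pvKnown, List.mem_cons, List.not_mem_nil, or_false, not_or] at h
    obtain ⟨h1, h2, h3, h4, h5, h6, h7, h8, h9, h10, h11, h12, h13, h14, h15, h16, h17,
      h18, h19, h20, h21, h22, h23, h24⟩ := h
    have l1 : PySem.Str.lower "Bash" = "bash" := rfl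
    have l2 : PySem.Str.lower "Perl" = "perl" := rfl
    have l3 : PySem.Str.lower "Python" = "python" := rfl
    have l4 : PySem.Str.lower "R" = "r" := rfl
    have l5 : PySem.Str.lower "Ruby" = "ruby" := rfl
    have l6 : PySem.Str.lower "Rust" = "rust" := rfl
    have l7 : PySem.Str.lower "Dart" = "dart" := rfl
    have l8 : PySem.Str.lower "dotnet" = "dotnet" := rfl
    have l9 : PySem.Str.lower "Go" = "go" := rfl
    have l10 : PySem.Str.lower "Groovy" = "groovy" := rfl
    have l11 : PySem.Str.lower "Java" = "java" := rfl
    have l12 : PySem.Str.lower "JavaScript" = "javascript" := rfl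
    have l13 : PySem.Str.lower "Kotlin" = "kotlin" := rfl
    have l14 : PySem.Str.lower "Objective-C" = "objective-c" := rfl
    have l15 : PySem.Str.lower "PHP" = "php" := rfl
    have l16 : PySem.Str.lower "Scala" = "scala" := rfl
    have l17 : PySem.Str.lower "Swift" = "swift" := rfl
    have l18 : PySem.Str.lower "C" = "c" := rfl
    have l19 : PySem.Str.lower "C++" = "c++" := rfl
    have l20 : PySem.Str.lower "CSS" = "css" := rfl
    have l21 : PySem.Str.lower "Clojure" = "clojure" := rfl
    have l22 : PySem.Str.lower "HTML" = "html" := rfl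
    have l23 : PySem.Str.lower "Lua" = "lua" := rfl
    have l24 : PySem.Str.lower "SQL" = "sql" := rfl
    simp [pvRecords, pvMapping, PySem.Dict.ofList,
      l1, l2, l3, l4, l5, l6, l7, l8, l9, l10, l11, l12, l13, l14, l15, l16, l17, l18, l19, l20, l21, l22, l23, l24,
      Ne.symm h1, Ne.symm h2, Ne.symm h3, Ne.symm h4, Ne.symm h5, Ne.symm h6, Ne.symm h7, Ne.symm h8, Ne.symm h9, Ne.symm h10, Ne.symm h11, Ne.symm h12, Ne.symm h13, Ne.symm h14, Ne.symm h15, Ne.symm h16, Ne.symm h17, Ne.symm h18, Ne.symm h19, Ne.symm h20, Ne.symm h21, Ne.symm h22, Ne.symm h23, Ne.symm h24]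
    rw [pv_getD_update_not_mem _ _ _ (by
      intro p hp
      simp only [List.mem_cons, List.not_mem_nil, or_false] at hp
      rcases hp with h|h|h|h|h|h|h|h|h|h|h|h|h|h|h|h|h|h|h|h|h|h|h|h <;> subst h <;>
        exact fun e => absurd e.symm (by assumption))]
    rfl

-- ===== VERDICT (by name: the statement is the Claim_ definition above) =====
theorem get_comment_patterns_spec : Claim_equal_get_comment_patterns := by
  intro lang _
  unfold Spec_get_comment_patterns get_comment_patterns get_comment_patterns_alt
  exact pv_core_eq (PySem.Str.lower lang)
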